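-- pv_equiv track=rewrite | github.com/Lvanished/diata_mcp_server | scripts/compare_layered_vs_fulltext.py | _pipeline_evidence_flags
-- ===== SOURCE A (Python) =====
-- from typing import Any
--
-- def _pipeline_evidence_flags(art: dict[str, Any]) -> tuple[bool, bool, list[str]]:
--     clinical = False
--     mech = False
--     types: list[str] = []
--     for c in art.get("contexts") or []:
--         ev = str(c.get("evidence_type") or "")
--         if ev:
--             types.append(ev)
--         if ev == "clinical_or_direct_qt_evidence":
--             clinical = True
--         if ev == "mechanistic_herg_ikr_evidence":
--             mech = True
--     return clinical, mech, sorted(set(types))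
-- ===== SOURCE B (Python) =====
-- from typing import Any
--
-- def _pipeline_evidence_flags(art: dict[str, Any]) -> tuple[bool, bool, list[str]]:
--     # Maintain a strictly sorted, duplicate-free list incrementally (ordered
--     # insertion), instead of collecting all types and sorting a set at the end.
--     unique: list[str] = []
--     for c in art.get("contexts") or []:
--         ev = str(c.get("evidence_type") or "")
--         if ev:
--             i = 0
--             while i < len(unique) and unique[i] < ev:
--                 i += 1
--             if i == len(unique) or unique[i] != ev:
--                 unique.insert(i, ev)
--     return ("clinical_or_direct_qt_evidence" in unique,
--             "mechanistic_herg_ikr_evidence" in unique,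
--             unique)
-- ===== Notes on version B (the rewrite author's own statement) =====
-- stated objective: alternative
-- what changed: B replaces A's collect-then-sort-a-set strategy by incrementally maintaining a strictly sorted duplicate-free list (ordered insertion with a scan for the insert position, skipping duplicates) and derives both flags as membership tests on that list, so there is no types list, no set and no final sort.
import Mathlib
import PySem

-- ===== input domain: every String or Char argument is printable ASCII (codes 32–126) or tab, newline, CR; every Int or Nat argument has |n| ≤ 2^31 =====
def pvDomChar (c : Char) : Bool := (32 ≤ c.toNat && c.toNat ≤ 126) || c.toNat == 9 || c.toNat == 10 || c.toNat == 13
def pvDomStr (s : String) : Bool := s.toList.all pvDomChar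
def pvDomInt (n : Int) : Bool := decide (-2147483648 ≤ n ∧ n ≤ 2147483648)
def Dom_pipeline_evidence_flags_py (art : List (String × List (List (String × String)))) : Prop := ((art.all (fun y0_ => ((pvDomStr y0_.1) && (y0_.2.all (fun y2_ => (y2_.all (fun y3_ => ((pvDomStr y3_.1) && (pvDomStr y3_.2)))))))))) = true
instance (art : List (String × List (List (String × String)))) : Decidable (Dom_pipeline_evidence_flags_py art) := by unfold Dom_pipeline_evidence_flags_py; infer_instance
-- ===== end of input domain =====

-- B change (objective: alternative): instead of collecting the non-empty evidence strings
-- and sorting the deduplicated set at the end, B maintains a strictly sorted duplicate-free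
-- list by ordered insertion and answers both flags by membership in that list.

-- ===== PORT A =====
-- `art.get("contexts") or []` : falsy (missing or empty) gives []
def pvCtxs (art : List (String × List (List (String × String)))) : List (List (String × String)) :=
  match PySem.Dict.get? (PySem.Dict.mk art) "contexts" with
  | none => []
  | some l => if List.isEmpty l then [] else l

-- `str(c.get("evidence_type") or "")` : values are strings, str is identity
def pvEv (c : List (String × String)) : String :=
  match PySem.Dict.get? (PySem.Dict.mk c) "evidence_type" with
  | none => ""
  | some s => if String.isEmpty s then "" else s

-- the for-loop of A over (clinical, mech, types)
def pvLoopA (cs : List (List (String × String))) (clinical mech : Bool) (types : List String) :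
    Bool × Bool × List String :=
  match cs with
  | [] => (clinical, mech, types)
  | c :: rest =>
      let ev := pvEv c
      let types' := if ev ≠ "" then types ++ [ev] else types
      let clinical' := if ev = "clinical_or_direct_qt_evidence" then true else clinical
      let mech' := if ev = "mechanistic_herg_ikr_evidence" then true else mech
      pvLoopA rest clinical' mech' types'

def pipeline_evidence_flags_py (art : List (String × List (List (String × String)))) : Bool × Bool × List String :=
  let r := pvLoopA (pvCtxs art) false false []
  (r.1, r.2.1, PySem.List.sorted (PySem.Set.ofList r.2.2) (fun x => x) false)

-- ===== PORT B =====
-- B's while-scan + conditional insert, as the obvious structural recursion: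
-- walk past the elements < ev; insert ev unless it is already there.
def pvInsUnique (ev : String) : List String → List String
  | [] => [ev]
  | x :: rest =>
      if x < ev then x :: pvInsUnique ev rest
      else if x ≠ ev then ev :: x :: rest
      else x :: rest

-- B's for-loop over the single accumulator `unique`
def pvLoopB (cs : List (List (String × String))) (unique : List String) : List String :=
  match cs with
  | [] => unique
  | c :: rest =>
      let ev := pvEv c
      pvLoopB rest (if ev ≠ "" then pvInsUnique ev unique else unique)

def pipeline_evidence_flags_py_alt (art : List (String × List (List (String × String)))) : Bool × Bool × List String :=
  let unique := pvLoopB (pvCtxs art) []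
  (unique.contains "clinical_or_direct_qt_evidence",
   unique.contains "mechanistic_herg_ikr_evidence",
   unique)

-- ===== PRECONDITION & SPEC =====
def Spec_pipeline_evidence_flags_py (art : List (String × List (List (String × String)))) (out : Bool × Bool × List String) : Prop := out = pipeline_evidence_flags_py_alt art
instance (art : List (String × List (List (String × String)))) (out : Bool × Bool × List String) : Decidable (Spec_pipeline_evidence_flags_py art out) := by unfold Spec_pipeline_evidence_flags_py; infer_instance

-- ===== CLAIM (what is proved, stated in full; the proofs are below) =====
def Claim_equal_pipeline_evidence_flags_py : Prop := ∀ (art : List (String × List (List (String × String)))), Dom_pipeline_evidence_flags_py art → Spec_pipeline_evidence_flags_py art (pipeline_evidence_flags_py art)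

-- ===== LEMMAS AND PROOFS =====

-- closed form of A's loop: the flags are any-scans, the list is the filtered map
theorem pvLoopA_closed (cs : List (List (String × String))) (clinical mech : Bool) (types : List String) :
    pvLoopA cs clinical mech types =
      (clinical || cs.any (fun c => pvEv c = "clinical_or_direct_qt_evidence"),
       mech || cs.any (fun c => pvEv c = "mechanistic_herg_ikr_evidence"),
       types ++ (cs.map pvEv).filter (fun ev => ev ≠ "")) := by
  induction cs generalizing clinical mech types with
  | nil => simp [pvLoopA]
  | cons c rest ih =>
      simp only [pvLoopA, ih, List.map_cons, List.filter_cons, List.any_cons]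
      by_cases h1 : pvEv c = "clinical_or_direct_qt_evidence" <;>
      by_cases h2 : pvEv c = "mechanistic_herg_ikr_evidence" <;>
      by_cases h3 : pvEv c = "" <;>
        simp_all [List.append_assoc]

theorem mem_pvInsUnique (ev y : String) (l : List String) :
    y ∈ pvInsUnique ev l ↔ y = ev ∨ y ∈ l := by
  induction l with
  | nil => simp [pvInsUnique]
  | cons x rest ih =>
      simp only [pvInsUnique]
      split_ifs with h1 h2 <;> simp_all <;> tauto

theorem pairwise_pvInsUnique (ev : String) (l : List String)
    (h : l.Pairwise (· < ·)) : (pvInsUnique ev l).Pairwise (· < ·) := by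
  induction l with
  | nil => simp [pvInsUnique]
  | cons x rest ih =>
      rw [List.pairwise_cons] at h
      simp only [pvInsUnique]
      split_ifs with h1 h2
      · rw [List.pairwise_cons]
        refine ⟨fun y hy => ?_, ih h.2⟩
        rcases (mem_pvInsUnique ev y rest).1 hy with rfl | hm
        · exact h1
        · exact h.1 y hm
      · have hx : ev < x := lt_of_le_of_ne (not_lt.1 h1) (Ne.symm h2)
        refine List.pairwise_cons.2 ⟨fun y hy => ?_, List.pairwise_cons.2 h⟩
        rcases hy with _ | hm
        · exact hx
        · exact lt_trans hx (h.1 y (by assumption))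
      · exact List.pairwise_cons.2 h

theorem mem_pvLoopB (cs : List (List (String × String))) (u : List String) (y : String) :
    y ∈ pvLoopB cs u ↔ y ∈ u ∨ y ∈ (cs.map pvEv).filter (fun ev => ev ≠ "") := by
  induction cs generalizing u with
  | nil => simp [pvLoopB]
  | cons c rest ih =>
      simp only [pvLoopB, ih, List.map_cons, List.filter_cons]
      by_cases h : pvEv c = "" <;> simp_all [mem_pvInsUnique] <;> tauto

theorem pairwise_pvLoopB (cs : List (List (String × String))) (u : List String)
    (h : u.Pairwise (· < ·)) : (pvLoopB cs u).Pairwise (· < ·) := by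
  induction cs generalizing u with
  | nil => exact h
  | cons c rest ih =>
      simp only [pvLoopB]
      split_ifs with h1
      · exact ih _ (pairwise_pvInsUnique _ _ h)
      · exact ih _ h

-- B's accumulator is exactly sorted(set(·)) of A's collected list
theorem pvLoopB_eq_sorted (cs : List (List (String × String))) :
    PySem.List.sorted (PySem.Set.ofList ((cs.map pvEv).filter (fun ev => ev ≠ ""))) (fun x => x) false
      = pvLoopB cs [] := by
  apply PySem.List.sorted_eq_of_perm_of_pairwise_lt
  · rw [List.perm_ext_iff_of_nodup]
    · intro y
      rw [PySem.Set.mem_ofList, mem_pvLoopB]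
      simp
    · exact (pairwise_pvLoopB cs [] (by simp)).nodup
    · exact PySem.Set.nodup_ofList _
  · exact pairwise_pvLoopB cs [] (by simp)

theorem pvFlag_iff (cs : List (List (String × String))) (S : String) (hS : S ≠ "") :
    (∃ x ∈ cs, pvEv x = S) ↔ S ∈ pvLoopB cs [] := by
  rw [mem_pvLoopB]
  simp only [List.not_mem_nil, false_or, List.mem_filter, List.mem_map, decide_eq_true_eq]
  constructor
  · rintro ⟨c, hc, rfl⟩; exact ⟨⟨c, hc, rfl⟩, hS⟩
  · rintro ⟨⟨c, hc, rfl⟩, -⟩; exact ⟨c, hc, rfl⟩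

-- ===== VERDICT (by name: the statement is the Claim_ definition above) =====
theorem pipeline_evidence_flags_py_spec : Claim_equal_pipeline_evidence_flags_py := by
  intro art _
  unfold Spec_pipeline_evidence_flags_py pipeline_evidence_flags_py pipeline_evidence_flags_py_alt
  simp only [pvLoopA_closed, Bool.false_or, List.nil_append]
  refine Prod.ext ?_ (Prod.ext ?_ (pvLoopB_eq_sorted _))
  all_goals
    rw [Bool.eq_iff_iff]
    simp only [List.any_eq_true, decide_eq_true_eq, List.contains_eq_mem]
    rw [pvFlag_iff _ _ (by decide)]
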